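-- pv_equiv track=rewrite | github.com/Vika-Koval/Forscher-ai-research | week3_unittest/aliens_and_iq/blackbox/rescue.py | rescue_people
-- ===== SOURCE A (Python) =====
-- def rescue_people(smarties, limit_iq):
--     '''
--     (dict,int)->tuple
--     The function returns a tuple of the number of required trips and a list of lists,
--     where each inner list represents a trip and contains the names of the people
--     transported on that trip in the order in which they were chosen by the aliens.
--     >>> rescue_people({"Albert Einstein": 160, "Sir Isaac Newton": 195, "Nikola Tesla": 189},500)
--     (2, [['Sir Isaac Newton', 'Nikola Tesla'], ['Albert Einstein']])
--     '''
--     smarties = {name: iq for name, iq in smarties.items() if iq >= 130}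
--     if not smarties:
--         return 0, []
--     smarties = dict(sorted(smarties.items(), key=lambda x: (-x[1], x[0])))
--     lst2 = []
--     while smarties:
--         lst1 = []
--         remaining_iq = limit_iq
--         for key, value in smarties.items():
--             if value <= remaining_iq:
--                 lst1.append(key)
--                 remaining_iq -= value
--         lst2.append(lst1)
--         smarties = {key: value for key, value in smarties.items() if key not in lst1}
--     count = len(lst2)
--     return count, lst2
-- ===== SOURCE B (Python) =====
-- def rescue_people(smarties, limit_iq):
--     people = sorted([(n, iq) for n, iq in smarties.items() if iq >= 130],
--                     key=lambda p: (-p[1], p[0]))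
--     trips = []  # each trip: [names, remaining capacity]
--     for name, iq in people:
--         for trip in trips:
--             if iq <= trip[1]:
--                 trip[0].append(name)
--                 trip[1] -= iq
--                 break
--         else:
--             trips.append([[name], limit_iq - iq])
--     return len(trips), [t[0] for t in trips]
-- ===== Notes on version B (the rewrite author's own statement) =====
-- stated objective: simpler
-- what changed: Replaced A's multi-pass while-loop (one greedy rescan of the remaining people per trip, rebuilding the dict after each pass) by a single first-fit pass over the sorted people that keeps each trip's remaining capacity, appending a person to the first trip that still fits or opening a new trip.
import Mathlib
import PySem

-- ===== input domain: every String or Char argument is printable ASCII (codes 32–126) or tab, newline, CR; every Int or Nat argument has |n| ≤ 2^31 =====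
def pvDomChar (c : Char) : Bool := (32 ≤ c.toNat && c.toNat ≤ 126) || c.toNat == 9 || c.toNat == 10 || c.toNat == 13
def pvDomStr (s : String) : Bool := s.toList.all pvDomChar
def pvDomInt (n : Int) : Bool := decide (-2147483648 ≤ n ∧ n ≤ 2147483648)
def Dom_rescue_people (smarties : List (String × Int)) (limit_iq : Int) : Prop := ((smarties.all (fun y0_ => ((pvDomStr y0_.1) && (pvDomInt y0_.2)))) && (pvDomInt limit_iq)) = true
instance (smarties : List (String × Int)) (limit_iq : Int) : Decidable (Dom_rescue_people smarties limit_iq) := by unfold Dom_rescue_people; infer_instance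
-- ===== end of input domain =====

-- B replaces A's repeated rescan-and-rebuild passes over the remaining people by a single
-- first-fit pass over the sorted people that maintains each trip's remaining capacity (objective: simpler).


-- ===== PORT A =====
-- the for-loop over smarties.items(): collect the names that still fit, decrementing remaining_iq
def rescuePassA (remaining : Int) : List (String × Int) → List String
  | [] => []
  | (n, i) :: t => if i ≤ remaining then n :: rescuePassA (remaining - i) t else rescuePassA remaining t

-- the while-loop: one pass, append lst1, drop the taken keys, repeat; fuel bounds the iterations
-- (inside Pre_ every pass takes at least one person, so fuel = length + 1 never runs out)
def rescueLoopA (limit_iq : Int) : Nat → List (String × Int) → List (List String) → List (List String)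
  | 0, _, lst2 => lst2
  | fuel + 1, sm, lst2 =>
    if sm.isEmpty then lst2
    else
      let lst1 := rescuePassA limit_iq sm
      rescueLoopA limit_iq fuel (sm.filter (fun p => !(lst1.contains p.1))) (lst2 ++ [lst1])

def rescue_people (smarties : List (String × Int)) (limit_iq : Int) : Int × List (List String) :=
  -- the argument is a Python dict: its assoc-list picture is deduplicated exactly as dict() is
  let sm0 := (PySem.Dict.ofList smarties).items.filter (fun p => 130 ≤ p.2)
  if sm0.isEmpty then (0, [])
  else
    let sm := PySem.List.sorted2 sm0 (fun p => -p.2) (fun p => p.1)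
    let lst2 := rescueLoopA limit_iq (sm.length + 1) sm []
    ((lst2.length : Int), lst2)

-- ===== PORT B =====
-- the inner for/else: put (n, i) into the first trip with enough remaining capacity, else open a new trip
def rescueInsB (limit_iq : Int) (n : String) (i : Int) : List (List String × Int) → List (List String × Int)
  | [] => [([n], limit_iq - i)]
  | (t, r) :: ts => if i ≤ r then (t ++ [n], r - i) :: ts else (t, r) :: rescueInsB limit_iq n i ts

def rescue_people_alt (smarties : List (String × Int)) (limit_iq : Int) : Int × List (List String) :=
  let people := PySem.List.sorted2 ((PySem.Dict.ofList smarties).items.filter (fun p => 130 ≤ p.2))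
      (fun p => -p.2) (fun p => p.1)
  let trips := people.foldl (fun ts p => rescueInsB limit_iq p.1 p.2 ts) []
  ((trips.length : Int), trips.map (·.1))

-- ===== PRECONDITION & SPEC =====
-- Pre_ excludes exactly the inputs where some kept person (IQ ≥ 130) has IQ above limit_iq:
-- there A's while-loop never removes that person and loops forever (A returns on everything else).
def Pre_rescue_people (smarties : List (String × Int)) (limit_iq : Int) : Prop :=
  ∀ p ∈ (PySem.Dict.ofList smarties).items, 130 ≤ p.2 → p.2 ≤ limit_iq
instance (smarties : List (String × Int)) (limit_iq : Int) : Decidable (Pre_rescue_people smarties limit_iq) := by unfold Pre_rescue_people; infer_instance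

def pvWitness_rescue_people : (List (String × Int)) × Int := ([("ne", 195), ("te", 189), ("ae", 160)], 500)

def Spec_rescue_people (smarties : List (String × Int)) (limit_iq : Int) (out : Int × List (List String)) : Prop := out = rescue_people_alt smarties limit_iq
instance (smarties : List (String × Int)) (limit_iq : Int) (out : Int × List (List String)) : Decidable (Spec_rescue_people smarties limit_iq out) := by unfold Spec_rescue_people; infer_instance

-- ===== CLAIM (what is proved, stated in full; the proofs are below) =====
def Claim_equal_rescue_people : Prop := ∀ (smarties : List (String × Int)) (limit_iq : Int), Dom_rescue_people smarties limit_iq → Pre_rescue_people smarties limit_iq → Spec_rescue_people smarties limit_iq (rescue_people smarties limit_iq)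

-- ===== LEMMAS AND PROOFS =====

-- One greedy pass, specified as a triple: (names taken, final remaining, leftover people).
def rescueOnePass (r : Int) : List (String × Int) → List String × Int × List (String × Int)
  | [] => ([], r, [])
  | (n, i) :: t =>
    if i ≤ r then
      let (tk, r', lf) := rescueOnePass (r - i) t
      (n :: tk, r', lf)
    else
      let (tk, r', lf) := rescueOnePass r t
      (tk, r', (n, i) :: lf)

theorem rescuePassA_eq_onePass (M : List (String × Int)) : ∀ r, rescuePassA r M = (rescueOnePass r M).1 := by
  induction M with
  | nil => intro r; rfl
  | cons p t ih =>
    intro r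
    obtain ⟨n, i⟩ := p
    simp only [rescuePassA, rescueOnePass]
    split_ifs <;> simp [ih]

theorem rescueOnePass_taken_subset (M : List (String × Int)) :
    ∀ r, ∀ x ∈ (rescueOnePass r M).1, x ∈ M.map Prod.fst := by
  induction M with
  | nil => intro r x hx; simp [rescueOnePass] at hx
  | cons p t ih =>
    intro r x hx
    obtain ⟨n, i⟩ := p
    simp only [rescueOnePass] at hx
    split_ifs at hx with h
    · simp only [List.mem_cons] at hx
      rcases hx with h1 | h2
      · simp [h1]
      · simpa using Or.inr (ih (r - i) x h2)
    · simpa using Or.inr (ih r x hx)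

theorem rescueOnePass_left_sublist (M : List (String × Int)) :
    ∀ r, (rescueOnePass r M).2.2.Sublist M := by
  induction M with
  | nil => intro r; simp [rescueOnePass]
  | cons p t ih =>
    intro r
    obtain ⟨n, i⟩ := p
    simp only [rescueOnePass]
    split_ifs with h
    · exact (ih (r - i)).cons _
    · exact (ih r).cons₂ _

-- The removal step of A's while-loop: filtering out the taken names leaves exactly the leftover list.
theorem rescueFilter_eq_left (M : List (String × Int)) :
    ∀ r, (M.map Prod.fst).Nodup →
      M.filter (fun p => !((rescueOnePass r M).1.contains p.1)) = (rescueOnePass r M).2.2 := by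
  induction M with
  | nil => intro r _; rfl
  | cons p t ih =>
    intro r hnd
    obtain ⟨n, i⟩ := p
    simp only [List.map_cons, List.nodup_cons] at hnd
    obtain ⟨hn, hnd'⟩ := hnd
    simp only [rescueOnePass]
    split_ifs with h
    · -- head taken: it is removed, and the tail's test ignores the head's name
      simp only [List.filter_cons]
      have hhead : (!((n :: (rescueOnePass (r - i) t).1).contains n)) = false := by simp
      rw [hhead]
      simp only [Bool.false_eq_true, if_false]
      have hcongr : ∀ p ∈ t,
          (!((n :: (rescueOnePass (r - i) t).1).contains p.1)) =
          (!((rescueOnePass (r - i) t).1.contains p.1)) := by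
        intro p hp
        have : p.1 ≠ n := by
          intro hEq
          exact hn (hEq ▸ List.mem_map_of_mem hp)
        simp [this]
      rw [List.filter_congr hcongr, ih (r - i) hnd']
    · -- head skipped: its name is not among the taken names, so it survives the filter
      have hnot : ((rescueOnePass r t).1.contains n) = false := by
        by_contra hc
        have hmem : n ∈ (rescueOnePass r t).1 := by
          simpa using Bool.of_not_eq_false hc
        exact hn (rescueOnePass_taken_subset t r n hmem)
      rw [List.filter_cons, if_pos (by simpa using hnot), ih r hnd']

-- The first-fit bridge: folding B's insertion over M with a partial head trip (t, r) fills that trip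
-- with exactly one greedy pass's take and sends the leftover people on into the later trips.
theorem rescueIns_bridge (limit_iq : Int) (M : List (String × Int)) :
    ∀ (t : List String) (r : Int) (ts : List (List String × Int)),
      M.foldl (fun s p => rescueInsB limit_iq p.1 p.2 s) ((t, r) :: ts)
        = (t ++ (rescueOnePass r M).1, (rescueOnePass r M).2.1)
            :: (rescueOnePass r M).2.2.foldl (fun s p => rescueInsB limit_iq p.1 p.2 s) ts := by
  induction M with
  | nil => intro t r ts; simp [rescueOnePass]
  | cons p M ih =>
    intro t r ts
    obtain ⟨n, i⟩ := p
    simp only [rescueOnePass, List.foldl_cons]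
    by_cases h : i ≤ r
    · simp only [if_pos h, rescueInsB, ih (t ++ [n]) (r - i) ts]
      simp
    · simp only [if_neg h, rescueInsB]
      rw [ih t r (rescueInsB limit_iq n i ts)]
      simp [List.foldl_cons]

-- A's whole while-loop equals B's single fold, names-wise.
theorem rescueLoop_eq_fold (limit_iq : Int) :
    ∀ (k : Nat) (M : List (String × Int)) (acc : List (List String)),
      M.length ≤ k → (M.map Prod.fst).Nodup → (∀ p ∈ M, p.2 ≤ limit_iq) →
      rescueLoopA limit_iq (k + 1) M acc
        = acc ++ (M.foldl (fun s p => rescueInsB limit_iq p.1 p.2 s) []).map (·.1) := by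
  intro k
  induction k with
  | zero =>
    intro M acc hlen _ _
    have : M = [] := List.eq_nil_of_length_eq_zero (Nat.le_zero.mp hlen)
    subst this
    simp [rescueLoopA]
  | succ k ih =>
    intro M acc hlen hnd hle
    match M with
    | [] => simp [rescueLoopA]
    | (n, i) :: M' =>
      have hi : i ≤ limit_iq := hle (n, i) (by simp)
      -- unfold one round of A's loop
      have hpass : rescuePassA limit_iq ((n, i) :: M')
          = n :: (rescueOnePass (limit_iq - i) M').1 := by
        rw [rescuePassA_eq_onePass]
        simp [rescueOnePass, if_pos hi]
      have honep : rescueOnePass limit_iq ((n, i) :: M')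
          = (n :: (rescueOnePass (limit_iq - i) M').1,
             (rescueOnePass (limit_iq - i) M').2.1,
             (rescueOnePass (limit_iq - i) M').2.2) := by
        simp [rescueOnePass, if_pos hi]
      have hfil : ((n, i) :: M').filter
            (fun p => !((rescuePassA limit_iq ((n, i) :: M')).contains p.1))
          = (rescueOnePass (limit_iq - i) M').2.2 := by
        rw [rescuePassA_eq_onePass]
        rw [rescueFilter_eq_left _ _ hnd, honep]
      set lf := (rescueOnePass (limit_iq - i) M').2.2 with hlf
      have hsub : lf.Sublist M' := rescueOnePass_left_sublist M' (limit_iq - i)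
      have hstep : rescueLoopA limit_iq (k + 1 + 1) ((n, i) :: M') acc
          = rescueLoopA limit_iq (k + 1)
              (((n, i) :: M').filter (fun p => !((rescuePassA limit_iq ((n, i) :: M')).contains p.1)))
              (acc ++ [rescuePassA limit_iq ((n, i) :: M')]) := rfl
      rw [hstep, hfil]
      have hlen' : lf.length ≤ k := le_trans hsub.length_le (by simpa using Nat.lt_succ_iff.mp (lt_of_lt_of_le (by simp) hlen))
      have hnd' : (lf.map Prod.fst).Nodup := ((hsub.map Prod.fst).nodup (by simpa using hnd.of_cons))
      have hle' : ∀ p ∈ lf, p.2 ≤ limit_iq := fun p hp => hle p (List.mem_cons_of_mem _ (hsub.mem hp))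
      rw [ih lf _ hlen' hnd' hle']
      -- and one round of B's fold
      have hfold : ((n, i) :: M').foldl (fun s p => rescueInsB limit_iq p.1 p.2 s) []
          = ([n] ++ (rescueOnePass (limit_iq - i) M').1, (rescueOnePass (limit_iq - i) M').2.1)
              :: lf.foldl (fun s p => rescueInsB limit_iq p.1 p.2 s) [] := by
        simp only [List.foldl_cons, rescueInsB]
        exact rescueIns_bridge limit_iq M' [n] (limit_iq - i) []
      rw [hfold, hpass]
      simp

-- ===== VERDICT (by name: the statement is the Claim_ definition above) =====
theorem rescue_people_spec : Claim_equal_rescue_people := by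
  intro smarties limit_iq _ hpre
  unfold Spec_rescue_people rescue_people rescue_people_alt
  set sm0 := (PySem.Dict.ofList smarties).items.filter (fun p => 130 ≤ p.2) with hsm0
  by_cases hE : sm0.isEmpty
  · have h0 : sm0 = [] := List.isEmpty_iff.mp hE
    have hsnil : PySem.List.sorted2 sm0 (fun p => -p.2) (fun p => p.1) = [] := by
      rw [h0]; rfl
    simp [hE, hsnil]
  · set sm := PySem.List.sorted2 sm0 (fun p => -p.2) (fun p => p.1) with hsm
    have hperm : sm.Perm sm0 := PySem.List.sorted2_perm sm0 (fun p => -p.2) (fun p => p.1) false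
    have hnditems : ((PySem.Dict.ofList smarties).items.map Prod.fst).Nodup := by
      have := PySem.Dict.nodup_keys_ofList (ps := smarties)
      simpa [PySem.Dict.keys] using this
    have hsub0 : sm0.Sublist (PySem.Dict.ofList smarties).items := List.filter_sublist
    have hnd0 : (sm0.map Prod.fst).Nodup := hnditems.sublist (hsub0.map Prod.fst)
    have hnd : (sm.map Prod.fst).Nodup := ((hperm.map Prod.fst).nodup_iff).mpr hnd0
    have hle : ∀ p ∈ sm, p.2 ≤ limit_iq := by
      intro p hp
      have hp0 : p ∈ sm0 := hperm.mem_iff.mp hp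
      rw [hsm0, List.mem_filter] at hp0
      exact hpre p hp0.1 (by simpa using hp0.2)
    have := rescueLoop_eq_fold limit_iq sm.length sm [] le_rfl hnd hle
    simp only [hE, Bool.false_eq_true, if_false]
    rw [this]
    simp
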